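-- pv_equiv track=rewrite | github.com/metasync/luban-ci | tools/luban-provisioner/templates/source/luban-dagster-dbt-starrocks-code-location-source-template/hooks/post_gen_project.py | _remove_output_block
-- ===== SOURCE A (Python) =====
-- def _remove_output_block(lines: list[str], output_name: str) -> list[str]:
--     header = f"    {output_name}:"
--     start = None
--     for i, line in enumerate(lines):
--         if line.rstrip("\n") == header:
--             start = i
--             break
--
--     if start is None:
--         return lines
--
--     end = len(lines)
--     for j in range(start + 1, len(lines)):
--         line = lines[j]
--         if line.startswith("    ") and not line.startswith("      ") and line.rstrip("\n").endswith(":"):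
--             end = j
--             break
--
--     kept = lines[:start] + lines[end:]
--
--     while len(kept) >= 2 and kept[start - 1].strip() == "" and kept[start].strip() == "":
--         kept.pop(start)
--
--     return kept
-- ===== SOURCE B (Python) =====
-- def _remove_output_block(lines: list[str], output_name: str) -> list[str]:
--     header = f"    {output_name}:"
--     out = []
--     found = False
--     skipping = False
--     for line in lines:
--         if skipping:
--             if line.startswith("    ") and not line.startswith("      ") and line.rstrip("\n").endswith(":"):
--                 skipping = False
--                 out.append(line)
--         elif not found and line.rstrip("\n") == header:
--             found = True
--             skipping = True
--         else:
--             out.append(line)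
--     return out if found else lines
-- ===== Notes on version B (the rewrite author's own statement) =====
-- stated objective: simpler
-- what changed: A finds the header index, finds the end index with a second indexed scan, concatenates two slices and then runs a while/pop junction-collapse loop over indices (which in fact never pops: the first kept suffix line is always a boundary line, which cannot be blank); B is a single pass over the lines with a copy/skip state machine and no indices, slices or collapse loop.
-- crash fix: When the header is found at index >= 2, is preceded by a blank line, and no boundary line follows it, A raises IndexError (kept[start] out of range in the collapse loop); B returns the prefix lines[:start], i.e. the file with the trailing block removed. — e.g. on _remove_output_block(["a:", "", " out:", " x: 1"], "out"): A raises IndexError, B returns ["a:", ""]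
import Mathlib
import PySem

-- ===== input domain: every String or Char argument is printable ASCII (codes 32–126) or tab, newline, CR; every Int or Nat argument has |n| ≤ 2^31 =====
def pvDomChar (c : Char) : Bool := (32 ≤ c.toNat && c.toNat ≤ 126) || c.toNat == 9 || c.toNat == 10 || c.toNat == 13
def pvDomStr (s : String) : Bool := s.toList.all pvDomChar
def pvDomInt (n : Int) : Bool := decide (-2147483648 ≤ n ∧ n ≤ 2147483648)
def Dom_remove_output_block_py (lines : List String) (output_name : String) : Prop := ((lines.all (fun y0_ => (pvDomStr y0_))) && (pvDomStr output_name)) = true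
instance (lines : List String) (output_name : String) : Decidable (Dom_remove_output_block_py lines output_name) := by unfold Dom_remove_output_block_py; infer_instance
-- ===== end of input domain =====

-- B replaces A's two indexed scans + slice concatenation + (dead, except for its IndexError) while/pop
-- junction-collapse loop by a single copy/skip state-machine pass; objective: simpler, same O(n) cost.

-- shared string primitives (used by both ports and by Pre_/Raises_)
-- s.rstrip("\n") ported by hand (PySem has no rstrip-with-chars): exact — drops trailing '\n' code points
def pvRstripNL (s : String) : String := String.ofList ((s.toList.reverse.dropWhile (fun c => c == '\n')).reverse)
-- line.startswith("    ") and not line.startswith("      ") and line.rstrip("\n").endswith(":")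
def pvIsBoundary (l : String) : Bool :=
  PySem.Str.startswith l "    " && !(PySem.Str.startswith l "      ") && PySem.Str.endswith (pvRstripNL l) ":"
-- line.strip() == ""
def pvBlank (s : String) : Bool := PySem.Str.strip s == ""
def pvHeader (output_name : String) : String := "    " ++ output_name ++ ":"

-- ===== PORT A =====
-- for i, line in enumerate(lines): if line.rstrip("\n") == header: start = i; break
def findStartA (header : String) : List String → Nat → Option Nat
  | [], _ => none
  | line :: rest, i => if pvRstripNL line == header then some i else findStartA header rest (i + 1)

-- for j in range(start + 1, len(lines)): … end = j; break
def findEndA (lines : List String) (j : Nat) : Nat :=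
  if h : j < lines.length then
    if pvIsBoundary lines[j] then j else findEndA lines (j + 1)
  else lines.length
termination_by lines.length - j

-- while len(kept) >= 2 and kept[start-1].strip() == "" and kept[start].strip() == "": kept.pop(start)
def popLoopA (start : Nat) (kept : List String) : List String :=
  if 2 ≤ kept.length then
    match PySem.List.pyGet? kept ((start : Int) - 1), PySem.List.pyGet? kept (start : Int) with
    | some a, some b =>
      if pvBlank a && pvBlank b then
        match hp : PySem.List.pop? kept (start : Int) with
        | some r => popLoopA start r.2
        | none => kept   -- unreachable: kept[start] exists
      else kept
    | _, _ => kept       -- kept[start] out of range: Python raises IndexError here (excluded by Pre_)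
  else kept
termination_by kept.length
decreasing_by exact by have := PySem.List.length_of_pop?_eq_some kept hp; omega

def remove_output_block_py (lines : List String) (output_name : String) : List String :=
  let header := pvHeader output_name
  match findStartA header lines 0 with
  | none => lines
  | some start =>
    let end_ := findEndA lines (start + 1)
    let kept := PySem.List.slice lines none (some (start : Int)) ++ PySem.List.slice lines (some (end_ : Int)) none
    popLoopA start kept

-- ===== PORT B =====
-- one step of Source B's loop; state = (out, found, skipping)
def altStep (header : String) (st : List String × Bool × Bool) (line : String) : List String × Bool × Bool :=
  if st.2.2 then
    if pvIsBoundary line then (st.1 ++ [line], st.2.1, false) else st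
  else if !st.2.1 && (pvRstripNL line == header) then (st.1, true, true)
  else (st.1 ++ [line], st.2.1, st.2.2)

def remove_output_block_py_alt (lines : List String) (output_name : String) : List String :=
  let header := pvHeader output_name
  let st := lines.foldl (altStep header) ([], false, false)
  if st.2.1 then st.1 else lines

-- ===== PRECONDITION & SPEC =====
-- the exact inputs where Python A raises IndexError: the header line is found at index s ≥ 2,
-- the line before it is blank, and no boundary line follows it (so kept[start] is out of range)
def pvCrash (lines : List String) (output_name : String) : Bool :=
  match lines.findIdx? (fun l => pvRstripNL l == pvHeader output_name) with
  | none => false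
  | some s => decide (2 ≤ s) && pvBlank (lines.getD (s - 1) "") && (lines.drop (s + 1)).all (fun l => !pvIsBoundary l)

-- Pre_ excludes exactly the inputs on which A raises IndexError (it returns everywhere else)
def Pre_remove_output_block_py (lines : List String) (output_name : String) : Prop :=
  pvCrash lines output_name = false
instance (lines : List String) (output_name : String) : Decidable (Pre_remove_output_block_py lines output_name) := by
  unfold Pre_remove_output_block_py; infer_instance

def pvWitness_remove_output_block_py : List String × String :=
  (["jobs:", "    out:", "      path: x", "    other:", "      y: 1"], "out")

-- A raises IndexError when the header is found at index ≥ 2, preceded by a blank line, with no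
-- boundary line after it; B returns the prefix lines[:start] (the file with the trailing block removed).
def Raises_remove_output_block_py (lines : List String) (output_name : String) : Prop :=
  pvCrash lines output_name = true
instance (lines : List String) (output_name : String) : Decidable (Raises_remove_output_block_py lines output_name) := by
  unfold Raises_remove_output_block_py; infer_instance
def pvRaiseWitness_remove_output_block_py : List String × String := (["a:", "", "    out:", "      x: 1"], "out")
def pvRaiseWitnessOut_remove_output_block_py : List String := ["a:", ""]

def Spec_remove_output_block_py (lines : List String) (output_name : String) (out : List String) : Prop :=
  out = remove_output_block_py_alt lines output_name
instance (lines : List String) (output_name : String) (out : List String) : Decidable (Spec_remove_output_block_py lines output_name out) := by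
  unfold Spec_remove_output_block_py; infer_instance

-- ===== CLAIM (what is proved, stated in full; the proofs are below) =====
def Claim_equal_remove_output_block_py : Prop := ∀ (lines : List String) (output_name : String), Dom_remove_output_block_py lines output_name → Pre_remove_output_block_py lines output_name → Spec_remove_output_block_py lines output_name (remove_output_block_py lines output_name)

def Claim_raises_remove_output_block_py : Prop := (∀ (lines : List String) (output_name : String), Dom_remove_output_block_py lines output_name → Raises_remove_output_block_py lines output_name → ¬ Pre_remove_output_block_py lines output_name) ∧ (Dom_remove_output_block_py (pvRaiseWitness_remove_output_block_py.1) (pvRaiseWitness_remove_output_block_py.2) ∧ Raises_remove_output_block_py (pvRaiseWitness_remove_output_block_py.1) (pvRaiseWitness_remove_output_block_py.2) ∧ remove_output_block_py_alt (pvRaiseWitness_remove_output_block_py.1) (pvRaiseWitness_remove_output_block_py.2) = pvRaiseWitnessOut_remove_output_block_py)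

-- ===== LEMMAS AND PROOFS =====

-- a boundary line ends in ':' (after stripping trailing newlines), so it is never blank
theorem pvBlank_of_boundary (l : String) (h : pvIsBoundary l = true) : pvBlank l = false := by
  have hend : PySem.Str.endswith (pvRstripNL l) ":" = true := by
    unfold pvIsBoundary at h
    simp only [Bool.and_eq_true] at h
    exact h.2
  have hmem : ':' ∈ l.toList := by
    rw [PySem.Str.endswith_eq, PySem.Chars.endswith_iff] at hend
    have h1 : ':' ∈ (pvRstripNL l).toList := by
      have := hend.mem (a := ':') (by simp)
      simpa using this
    unfold pvRstripNL at h1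
    rw [String.toList_ofList, List.mem_reverse] at h1
    have h2 := (List.dropWhile_sublist (l := l.toList.reverse) (fun c => c == '\n')).mem h1
    simpa using h2
  by_contra hb
  simp only [Bool.not_eq_false, pvBlank, beq_iff_eq] at hb
  have hnil : PySem.Chars.strip l.toList = [] := by
    have := congrArg String.toList hb
    rw [PySem.Str.toList_strip] at this
    simpa using this
  unfold PySem.Chars.strip PySem.Chars.rstrip PySem.Chars.lstrip at hnil
  rw [List.reverse_eq_nil_iff, List.dropWhile_eq_nil_iff] at hnil
  have hsp : PySem.Chars.isspace ':' = false := by decide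
  rcases (by rw [← List.takeWhile_append_dropWhile (p := PySem.Chars.isspace) (l := l.toList)] at hmem; exact List.mem_append.mp hmem :
      ':' ∈ l.toList.takeWhile PySem.Chars.isspace ∨ ':' ∈ l.toList.dropWhile PySem.Chars.isspace) with h1 | h1
  · rw [List.mem_takeWhile_imp h1] at hsp; cases hsp
  · have := hnil ':' (by simpa using h1)
    rw [this] at hsp; cases hsp

theorem findStartA_eq (header : String) (lines : List String) (i : Nat) :
    findStartA header lines i = (lines.findIdx? (fun l => pvRstripNL l == header)).map (· + i) := by
  induction lines generalizing i with
  | nil => simp [findStartA]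
  | cons l ls ih =>
    simp only [findStartA, List.findIdx?_cons]
    by_cases h : (pvRstripNL l == header) = true
    · simp [h]
    · simp only [Bool.not_eq_true] at h
      simp [h, ih, Option.map_map, Function.comp_def, Nat.add_assoc, Nat.add_comm 1 i]

theorem drop_findEndA (lines : List String) (j : Nat) :
    lines.drop (findEndA lines j) = (lines.drop j).dropWhile (fun l => !pvIsBoundary l) := by
  unfold findEndA
  split
  · rename_i h
    by_cases hb : pvIsBoundary lines[j] = true
    · rw [if_pos hb, List.drop_eq_getElem_cons h, List.dropWhile_cons]
      simp [hb]
    · simp only [Bool.not_eq_true] at hb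
      rw [if_neg (by simp [hb]), drop_findEndA lines (j + 1), List.drop_eq_getElem_cons h,
        List.dropWhile_cons]
      simp [hb]
  · rename_i h
    rw [List.drop_eq_nil_of_le (by omega), List.drop_eq_nil_of_le (by omega)]
    simp
termination_by lines.length - j

theorem head_dropWhile {a : Type} (p : a → Bool) (l : List a) (b : a) (rest : List a)
    (h : l.dropWhile p = b :: rest) : p b = false := by
  induction l with
  | nil => simp at h
  | cons x xs ih =>
    rw [List.dropWhile_cons] at h
    by_cases hx : p x = true
    · rw [if_pos hx] at h; exact ih h
    · rw [if_neg hx] at h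
      cases h; simpa using hx

theorem popLoopA_eq (start : Nat) (kept : List String)
    (hb : ∀ b, PySem.List.pyGet? kept (start : Int) = some b → pvBlank b = false) :
    popLoopA start kept = kept := by
  rw [popLoopA]
  split
  · rcases h1 : PySem.List.pyGet? kept ((start : Int) - 1) with _ | a <;>
      rcases h2 : PySem.List.pyGet? kept (start : Int) with _ | b <;> simp
    rw [hb b h2]
    simp
  · rfl

theorem foldl_copy (header : String) (lines : List String) (out : List String) :
    lines.foldl (altStep header) (out, true, false) = (out ++ lines, true, false) := by
  induction lines generalizing out with
  | nil => simp
  | cons l ls ih => simp [altStep, ih]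

theorem foldl_skip (header : String) (lines : List String) (out : List String) :
    ∃ sk, lines.foldl (altStep header) (out, true, true) =
      (out ++ lines.dropWhile (fun l => !pvIsBoundary l), true, sk) := by
  induction lines generalizing out with
  | nil => exact ⟨true, by simp⟩
  | cons l ls ih =>
    by_cases h : pvIsBoundary l = true
    · exact ⟨false, by simp [List.foldl_cons, altStep, h, foldl_copy]⟩
    · obtain ⟨sk, hsk⟩ := ih out
      refine ⟨sk, ?_⟩
      simp only [Bool.not_eq_true] at h
      simp [List.foldl_cons, altStep, h, hsk]

theorem foldl_main_none (header : String) (lines : List String) (out : List String)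
    (h : lines.findIdx? (fun l => pvRstripNL l == header) = none) :
    lines.foldl (altStep header) (out, false, false) = (out ++ lines, false, false) := by
  induction lines generalizing out with
  | nil => simp
  | cons l ls ih =>
    rw [List.findIdx?_cons] at h
    by_cases hl : (pvRstripNL l == header) = true
    · simp [hl] at h
    · simp only [Bool.not_eq_true] at hl
      rw [if_neg (by simp [hl]), Option.map_eq_none_iff] at h
      simp [List.foldl_cons, altStep, hl, ih _ h]

theorem foldl_main_some (header : String) (lines : List String) (out : List String) (s : Nat)
    (h : lines.findIdx? (fun l => pvRstripNL l == header) = some s) :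
    ∃ sk, lines.foldl (altStep header) (out, false, false) =
      (out ++ lines.take s ++ (lines.drop (s + 1)).dropWhile (fun l => !pvIsBoundary l), true, sk) := by
  induction lines generalizing out s with
  | nil => simp at h
  | cons l ls ih =>
    rw [List.findIdx?_cons] at h
    by_cases hl : (pvRstripNL l == header) = true
    · rw [if_pos (by simp [hl])] at h
      cases h
      obtain ⟨sk, hsk⟩ := foldl_skip header ls out
      exact ⟨sk, by simpa [List.foldl_cons, altStep, hl] using hsk⟩
    · simp only [Bool.not_eq_true] at hl
      rw [if_neg (by simp [hl]), Option.map_eq_some_iff] at h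
      obtain ⟨s', hs', rfl⟩ := h
      obtain ⟨sk, hsk⟩ := ih (out ++ [l]) s' hs'
      exact ⟨sk, by simp [List.foldl_cons, altStep, hl, hsk]⟩

theorem alt_char_none (lines : List String) (name : String)
    (h : lines.findIdx? (fun l => pvRstripNL l == pvHeader name) = none) :
    remove_output_block_py_alt lines name = lines := by
  simp only [remove_output_block_py_alt]
  rw [foldl_main_none _ _ _ h]
  simp

theorem alt_char_some (lines : List String) (name : String) (s : Nat)
    (h : lines.findIdx? (fun l => pvRstripNL l == pvHeader name) = some s) :
    remove_output_block_py_alt lines name =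
      lines.take s ++ (lines.drop (s + 1)).dropWhile (fun l => !pvIsBoundary l) := by
  simp only [remove_output_block_py_alt]
  obtain ⟨sk, hsk⟩ := foldl_main_some (pvHeader name) lines [] s h
  simp [hsk]

theorem A_char_none (lines : List String) (name : String)
    (h : lines.findIdx? (fun l => pvRstripNL l == pvHeader name) = none) :
    remove_output_block_py lines name = lines := by
  simp only [remove_output_block_py]
  rw [findStartA_eq]
  simp [h]

theorem A_char_some (lines : List String) (name : String) (s : Nat)
    (h : lines.findIdx? (fun l => pvRstripNL l == pvHeader name) = some s) :
    remove_output_block_py lines name =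
      lines.take s ++ (lines.drop (s + 1)).dropWhile (fun l => !pvIsBoundary l) := by
  simp only [remove_output_block_py]
  rw [findStartA_eq]
  simp only [h, Option.map_some, Nat.add_zero]
  rw [PySem.List.slice_to_natCast, PySem.List.slice_from_natCast, drop_findEndA]
  have hs : s < lines.length := (List.findIdx?_eq_some_iff_findIdx_eq.mp h).1
  have hlen : (lines.take s).length = s := by simp [Nat.min_eq_left (le_of_lt hs)]
  apply popLoopA_eq
  intro b hb
  cases hD : (lines.drop (s + 1)).dropWhile (fun l => !pvIsBoundary l) with
  | nil =>
    rw [hD, List.append_nil, PySem.List.pyGet?_natCast] at hb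
    rw [List.getElem?_eq_none (by omega)] at hb
    cases hb
  | cons c cs =>
    have hbd : pvIsBoundary c = true := by
      have := head_dropWhile _ _ _ _ hD
      simpa using this
    rw [hD] at hb
    have hc : PySem.List.pyGet? (lines.take s ++ c :: cs) ((lines.take s).length : Int) = some c :=
      PySem.List.pyGet?_append_length _ _ _
    rw [hlen] at hc
    rw [hc] at hb
    cases hb
    exact pvBlank_of_boundary _ hbd

-- ===== VERDICT (by name: the statement is the Claim_ definition above) =====
theorem remove_output_block_py_spec : Claim_equal_remove_output_block_py := by
  intro lines name _ _
  unfold Spec_remove_output_block_py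
  cases h : lines.findIdx? (fun l => pvRstripNL l == pvHeader name) with
  | none => rw [alt_char_none lines name h, A_char_none lines name h]
  | some s => rw [A_char_some lines name s h, alt_char_some lines name s h]

@[simp] theorem remove_output_block_py_raises : Claim_raises_remove_output_block_py := by
  unfold Claim_raises_remove_output_block_py
  constructor
  · intro lines name _ hr hp
    unfold Raises_remove_output_block_py at hr
    unfold Pre_remove_output_block_py at hp
    rw [hr] at hp
    cases hp
  · exact ⟨by decide, by decide, by decide⟩
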